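-- pv_equiv track=rewrite | github.com/rafaelvc/AlgoDojo | rgb_sort.py | check_grouping
-- ===== SOURCE A (Python) =====
-- def check_grouping(rgbs):
--     if len(rgbs) == 0:
--         return True
--     cur_state = ''
--     cur_state = rgbs[0]
--     for c in rgbs[1:]:
--         if cur_state == c:
--             continue
--         if cur_state == 'R' and (c == 'G' or c == 'B'):
--             cur_state = c
--         elif cur_state == 'G' and c == 'B':
--             cur_state = c
--         else:
--             return False
--     return True
-- ===== SOURCE B (Python) =====
-- def check_grouping(rgbs):
--     # collapse consecutive equal elements into run keys
--     keys = []
--     for c in rgbs: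
--         if not keys or keys[-1] != c:
--             keys.append(c)
--     if len(keys) <= 1:
--         return True
--     rank = {'R': 0, 'G': 1, 'B': 2}
--     prev = -1
--     for k in keys:
--         r = rank.get(k)
--         if r is None or r <= prev:
--             return False
--         prev = r
--     return True
-- ===== Notes on version B (the rewrite author's own statement) =====
-- stated objective: alternative
-- what changed: Replaces the inline forward-transition state machine by a two-phase pass: collapse consecutive duplicates into run keys, then check the keys' ranks under {'R':0,'G':1,'B':2} are strictly increasing (length<=1 is trivially True).
import Mathlib
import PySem

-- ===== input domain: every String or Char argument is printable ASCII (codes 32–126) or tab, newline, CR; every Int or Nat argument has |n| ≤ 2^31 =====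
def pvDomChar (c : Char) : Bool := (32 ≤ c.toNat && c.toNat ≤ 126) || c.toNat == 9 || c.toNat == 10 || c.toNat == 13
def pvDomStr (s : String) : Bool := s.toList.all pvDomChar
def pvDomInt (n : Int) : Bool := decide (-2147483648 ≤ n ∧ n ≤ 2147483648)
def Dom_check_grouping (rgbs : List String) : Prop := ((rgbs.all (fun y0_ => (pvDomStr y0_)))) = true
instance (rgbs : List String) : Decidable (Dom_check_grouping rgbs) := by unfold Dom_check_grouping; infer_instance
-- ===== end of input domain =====

-- B is an alternative decomposition (collapse runs, then check strictly increasing ranks); same cost, no speed claim.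

-- ===== PORT A =====
-- the 'for c in rgbs[1:]' loop, carrying cur_state
def check_grouping_loop (cur : String) : List String → Bool
  | [] => true
  | c :: rest =>
    if cur == c then check_grouping_loop cur rest
    else if cur == "R" && (c == "G" || c == "B") then check_grouping_loop c rest
    else if cur == "G" && c == "B" then check_grouping_loop c rest
    else false

def check_grouping (rgbs : List String) : Bool :=
  match rgbs with
  | [] => true
  | h :: t => check_grouping_loop h t

-- ===== PORT B =====
-- first loop of Source B: collapse consecutive equal elements into run keys (append-at-end, keys[-1] check)
def cg_collapse (rgbs : List String) : List String :=
  rgbs.foldl (fun ks c =>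
    match ks.getLast? with
    | none => ks ++ [c]
    | some l => if l == c then ks else ks ++ [c]) []

def cg_rank : PySem.Dict String Int := PySem.Dict.ofList [("R", 0), ("G", 1), ("B", 2)]

-- second loop of Source B: prev accumulator, rank.get
def cg_check (prev : Int) : List String → Bool
  | [] => true
  | k :: rest =>
    match cg_rank.get? k with
    | none => false
    | some r => if r ≤ prev then false else cg_check r rest

def check_grouping_alt (rgbs : List String) : Bool :=
  let keys := cg_collapse rgbs
  if keys.length ≤ 1 then true
  else cg_check (-1) keys

-- ===== PRECONDITION & SPEC =====
def Spec_check_grouping (rgbs : List String) (out : Bool) : Prop := out = check_grouping_alt rgbs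
instance (rgbs : List String) (out : Bool) : Decidable (Spec_check_grouping rgbs out) := by unfold Spec_check_grouping; infer_instance

-- ===== CLAIM (what is proved, stated in full; the proofs are below) =====
def Claim_equal_check_grouping : Prop := ∀ (rgbs : List String), Dom_check_grouping rgbs → Spec_check_grouping rgbs (check_grouping rgbs)

-- ===== LEMMAS AND PROOFS =====

-- recursive characterisation of the run-collapsing loop, relative to a current run key
def cg_runs (cur : String) : List String → List String
  | [] => []
  | c :: t => if cur == c then cg_runs cur t else c :: cg_runs c t

theorem cg_collapse_foldl (l : List String) : ∀ (ks : List String) (cur : String),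
    ks.getLast? = some cur →
    (l.foldl (fun ks c =>
      match ks.getLast? with
      | none => ks ++ [c]
      | some l => if l == c then ks else ks ++ [c]) ks) = ks ++ cg_runs cur l := by
  induction l with
  | nil => intro ks cur _; simp [cg_runs]
  | cons c t ih =>
    intro ks cur h
    simp only [List.foldl_cons, h, cg_runs]
    by_cases hc : (cur == c) = true
    · rw [if_pos hc, if_pos hc]
      exact ih ks cur h
    · rw [if_neg hc, if_neg hc]
      rw [ih (ks ++ [c]) c (by simp)]
      simp

theorem cg_collapse_cons (h : String) (t : List String) :
    cg_collapse (h :: t) = h :: cg_runs h t := by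
  unfold cg_collapse
  simp only [List.foldl_cons, List.getLast?_nil, List.nil_append]
  exact cg_collapse_foldl t [h] h (by simp)

theorem cg_rank_get (k : String) :
    cg_rank.get? k = if k = "R" then some 0 else if k = "G" then some 1
      else if k = "B" then some 2 else none := by
  have e : cg_rank = PySem.Dict.mk [("R", 0), ("G", 1), ("B", 2)] := by rfl
  rw [e]
  simp only [PySem.Dict.get?_mk_cons]
  split_ifs <;> simp_all [PySem.Dict.get?]

-- the heart: A's loop from state cur equals B's rank check over the runs after cur
theorem cg_loop_eq_check (t : List String) : ∀ (cur : String),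
    check_grouping_loop cur t =
      (match cg_runs cur t with
       | [] => true
       | gs => match cg_rank.get? cur with
               | none => false
               | some r => cg_check r gs) := by
  induction t with
  | nil => intro cur; simp [check_grouping_loop, cg_runs]
  | cons c t ih =>
    intro cur
    by_cases hc : cur = c
    · subst hc
      simp only [check_grouping_loop, beq_self_eq_true, if_true, cg_runs]
      exact ih cur
    · have hbc : (cur == c) = false := by simp [hc]
      simp only [check_grouping_loop, hbc, cg_runs, if_neg, Bool.false_eq_true,
        not_false_eq_true]
      rw [cg_rank_get cur]
      by_cases h1 : cur = "R" <;> by_cases h2 : cur = "G" <;> by_cases h3 : cur = "B" <;>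
        simp_all <;>
        (try subst h1) <;> (try subst h2) <;> (try subst h3) <;>
        by_cases k1 : c = "R" <;> by_cases k2 : c = "G" <;> by_cases k3 : c = "B" <;>
        simp_all [cg_check, cg_rank_get] <;>
        (cases hgs : cg_runs c t <;> simp_all [cg_check, cg_rank_get])

-- ===== VERDICT (by name: the statement is the Claim_ definition above) =====
theorem check_grouping_spec : Claim_equal_check_grouping := by
  intro rgbs _
  unfold Spec_check_grouping
  cases rgbs with
  | nil => rfl
  | cons h t =>
    show check_grouping_loop h t = check_grouping_alt (h :: t)
    unfold check_grouping_alt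
    simp only [cg_collapse_cons]
    rw [cg_loop_eq_check t h]
    cases hgs : cg_runs h t with
    | nil => simp
    | cons g gs =>
      simp only [List.length_cons]
      have hlen : ¬ gs.length + 1 + 1 ≤ 1 := by omega
      rw [if_neg hlen]
      show (match cg_rank.get? h with
            | none => false
            | some r => cg_check r (g :: gs)) = cg_check (-1) (h :: g :: gs)
      rw [cg_rank_get h]
      simp only [cg_check, cg_rank_get]
      by_cases h1 : h = "R" <;> by_cases h2 : h = "G" <;> by_cases h3 : h = "B" <;>
        simp_all
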